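-- pv_equiv track=rewrite | github.com/philliphelms/iMPS | iDMRG/iDMRG.py | mpsMatDim
-- ===== SOURCE A (Python) =====
-- def mpsMatDim(N,maxBondDim,d=2):
--     assert(N%2==0)
--     # Determine Matrix Dimensions
--     fbd_site = []
--     mbd_site = []
--     fbd_site.insert(0,1)
--     mbd_site.insert(0,1)
--     for i in range(int(N/2)):
--         fbd_site.insert(-1,d**i)
--         mbd_site.insert(-1,min(d**i,maxBondDim))
--     for i in range(int(N/2))[::-1]:
--         fbd_site.insert(-1,d**(i+1))
--         mbd_site.insert(-1,min(d**(i+1),maxBondDim))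
--     return fbd_site, mbd_site
-- ===== SOURCE B (Python) =====
-- def mpsMatDim(N, maxBondDim, d=2):
--     assert(N % 2 == 0)
--     # closed form: bond dim at cut k is d**min(k, N-k); the trailing boundary bond is 1
--     fbd_site = [d**min(k, N - k) for k in range(N)] + [1]
--     mbd_site = [min(d**min(k, N - k), maxBondDim) for k in range(N)] + [1]
--     return fbd_site, mbd_site
-- ===== Notes on version B (the rewrite author's own statement) =====
-- stated objective: simpler
-- what changed: Replaces the two directional insert(-1,...) loops building the list around a seed element with a single closed-form positional comprehension d**min(k, N-k) over k in range(N) plus the trailing boundary 1.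
import Mathlib
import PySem

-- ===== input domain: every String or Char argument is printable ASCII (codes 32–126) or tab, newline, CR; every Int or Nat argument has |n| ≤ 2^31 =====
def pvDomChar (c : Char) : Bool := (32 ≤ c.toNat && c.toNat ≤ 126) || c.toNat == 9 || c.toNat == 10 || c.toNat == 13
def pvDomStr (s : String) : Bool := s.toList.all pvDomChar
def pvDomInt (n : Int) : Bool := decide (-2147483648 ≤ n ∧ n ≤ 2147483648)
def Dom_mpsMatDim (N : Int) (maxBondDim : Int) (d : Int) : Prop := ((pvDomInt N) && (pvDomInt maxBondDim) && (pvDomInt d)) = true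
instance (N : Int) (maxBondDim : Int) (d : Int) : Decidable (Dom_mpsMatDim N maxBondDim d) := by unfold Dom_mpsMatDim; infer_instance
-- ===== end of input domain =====

-- B replaces A's two insert(-1,...) loops by one closed-form comprehension d**min(k,N-k); return value proved equal wherever A returns.

-- ===== PORT A =====
-- int(N/2) is exact for even |N| ≤ 2^31 (N/2 is an exact float, trunc = floor on an exact half), so floordiv is faithful here
def mpsMatDim (N : Int) (maxBondDim : Int) (d : Int) : List Int × List Int :=
  let half := PySem.Int.floordiv N 2
  let s1 := (PySem.List.pyRange 0 half 1).foldl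
      (fun (p : List Int × List Int) i =>
        (PySem.List.insert p.1 (-1) (d ^ i.toNat),
         PySem.List.insert p.2 (-1) (min (d ^ i.toNat) maxBondDim)))
      ([1], [1])
  let s2 := ((PySem.List.pyRange 0 half 1).reverse).foldl
      (fun (p : List Int × List Int) i =>
        (PySem.List.insert p.1 (-1) (d ^ (i + 1).toNat),
         PySem.List.insert p.2 (-1) (min (d ^ (i + 1).toNat) maxBondDim)))
      s1
  s2

-- ===== PORT B =====
def mpsMatDim_alt (N : Int) (maxBondDim : Int) (d : Int) : List Int × List Int :=
  let fbd := ((PySem.List.pyRange 0 N 1).map (fun k => d ^ (min k (N - k)).toNat)) ++ [1]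
  let mbd := ((PySem.List.pyRange 0 N 1).map (fun k => min (d ^ (min k (N - k)).toNat) maxBondDim)) ++ [1]
  (fbd, mbd)

-- ===== PRECONDITION & SPEC =====
-- Pre_ excludes exactly the odd N, on which A's assert raises AssertionError.
def Pre_mpsMatDim (N : Int) (maxBondDim : Int) (d : Int) : Prop := N % 2 = 0
instance (N : Int) (maxBondDim : Int) (d : Int) : Decidable (Pre_mpsMatDim N maxBondDim d) := by unfold Pre_mpsMatDim; infer_instance
def pvWitness_mpsMatDim : Int × Int × Int := (6, 3, 2)

def Spec_mpsMatDim (N : Int) (maxBondDim : Int) (d : Int) (out : List Int × List Int) : Prop := out = mpsMatDim_alt N maxBondDim d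
instance (N : Int) (maxBondDim : Int) (d : Int) (out : List Int × List Int) : Decidable (Spec_mpsMatDim N maxBondDim d out) := by unfold Spec_mpsMatDim; infer_instance

-- ===== CLAIM (what is proved, stated in full; the proofs are below) =====
def Claim_equal_mpsMatDim : Prop := ∀ (N : Int) (maxBondDim : Int) (d : Int), Dom_mpsMatDim N maxBondDim d → Pre_mpsMatDim N maxBondDim d → Spec_mpsMatDim N maxBondDim d (mpsMatDim N maxBondDim d)

-- ===== LEMMAS AND PROOFS =====

-- list.insert(-1, x) on a nonempty list inserts before the last element
theorem pv_insert_neg_one {ys : List Int} (t x : Int) :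
    PySem.List.insert (ys ++ [t]) (-1) x = ys ++ [x, t] := by
  simp [PySem.List.insert, PySem.List.sliceIndices]

-- both components of A's loop state keep the seed 1 last; folding appends the mapped indices before it
theorem pv_fold_insert (js : List Int) (f g : Int → Int) :
    ∀ (ys zs : List Int),
      js.foldl
        (fun (p : List Int × List Int) i =>
          (PySem.List.insert p.1 (-1) (f i), PySem.List.insert p.2 (-1) (g i)))
        (ys ++ [1], zs ++ [1])
      = (ys ++ js.map f ++ [1], zs ++ js.map g ++ [1]) := by
  induction js with
  | nil => intro ys zs; simp
  | cons j js ih =>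
    intro ys zs
    simp only [List.foldl_cons, pv_insert_neg_one]
    have h1 : ys ++ [f j, 1] = (ys ++ [f j]) ++ [1] := by simp
    have h2 : zs ++ [g j, 1] = (zs ++ [g j]) ++ [1] := by simp
    rw [h1, h2, ih]
    simp

-- the core closed form: a left ramp and a reversed ramp concatenate to one positional formula
theorem pv_core (n : Nat) (f0 f1 fh : Int → Int)
    (h0 : ∀ k : Nat, k < n → f0 (k : Int) = fh (k : Int))
    (h1 : ∀ k : Nat, k < n → f1 ((n - 1 - (k : Nat) : Nat) : Int) = fh ((n + k : Nat) : Int)) :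
    (List.range n).map (f0 ∘ fun k : Nat => (k : Int)) ++
      (List.range n).reverse.map (f1 ∘ fun k : Nat => (k : Int))
    = (List.range (2 * n)).map (fh ∘ fun k : Nat => (k : Int)) := by
  apply List.ext_getElem
  · simp; omega
  · intro j hj1 hj2
    simp only [List.length_append, List.length_map, List.length_reverse,
      List.length_range] at hj1
    by_cases hcase : j < n
    · rw [List.getElem_append_left (by simpa using hcase)]
      simp only [List.getElem_map, List.getElem_range, Function.comp]
      exact h0 j hcase
    · rw [List.getElem_append_right (by simpa using hcase)]
      simp only [List.getElem_map, List.getElem_reverse, List.length_map, List.length_range,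
        List.getElem_range, Function.comp]
      have := h1 (j - n) (by omega)
      rw [show n + (j - n) = j by omega] at this
      exact this

-- ===== VERDICT (by name: the statement is the Claim_ definition above) =====
theorem mpsMatDim_spec : Claim_equal_mpsMatDim := by
  intro N m d _ hpre
  unfold Pre_mpsMatDim at hpre
  unfold Spec_mpsMatDim mpsMatDim mpsMatDim_alt
  dsimp only
  obtain ⟨h, rfl⟩ : ∃ h : Int, N = 2 * h := ⟨N / 2, by omega⟩
  have hfd : PySem.Int.floordiv (2 * h) 2 = h := by
    simp [PySem.Int.floordiv]
  rw [hfd]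
  rcases le_or_gt 0 h with hpos | hneg
  · -- nonnegative chain: both sides are the ramp of length 2h+1
    obtain ⟨n, rfl⟩ := Int.eq_ofNat_of_zero_le hpos
    have hr : PySem.List.pyRange 0 (n : Int) 1 = (List.range n).map (fun k : Nat => (k : Int)) := by
      rw [PySem.List.pyRange_one]
      rw [show ((n : Int) - 0).toNat = n by omega]
      exact List.map_congr_left (fun k _ => by omega)
    have hr2 : PySem.List.pyRange 0 (2 * (n : Int)) 1
        = (List.range (2 * n)).map (fun k : Nat => (k : Int)) := by
      rw [PySem.List.pyRange_one]
      rw [show ((2 * (n : Int)) - 0).toNat = 2 * n by omega]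
      exact List.map_congr_left (fun k _ => by omega)
    rw [hr, hr2]
    rw [show (([1], [1]) : List Int × List Int)
        = (([] : List Int) ++ [1], ([] : List Int) ++ [1]) by simp]
    rw [pv_fold_insert ((List.range n).map (fun k : Nat => (k : Int)))
        (fun i => d ^ i.toNat) (fun i => min (d ^ i.toNat) m) [] []]
    simp only [List.nil_append]
    rw [pv_fold_insert (((List.range n).map (fun k : Nat => (k : Int))).reverse)
        (fun i => d ^ (i + 1).toNat) (fun i => min (d ^ (i + 1).toNat) m) _ _]
    rw [← List.map_reverse]
    simp only [List.map_map, Prod.mk.injEq]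
    refine ⟨?_, ?_⟩
    · congr 1
      exact pv_core n (fun i => d ^ i.toNat) (fun i => d ^ (i + 1).toNat)
        (fun k => d ^ (min k (2 * (n : Int) - k)).toNat)
        (fun k hk => by dsimp only; congr 1; omega)
        (fun k hk => by dsimp only; congr 1; omega)
    · congr 1
      exact pv_core n (fun i => min (d ^ i.toNat) m) (fun i => min (d ^ (i + 1).toNat) m)
        (fun k => min (d ^ (min k (2 * (n : Int) - k)).toNat) m)
        (fun k hk => by dsimp only; rw [show ((k : Int)).toNat
            = (min (k : Int) (2 * (n : Int) - (k : Int))).toNat by omega])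
        (fun k hk => by dsimp only; rw [show (((n - 1 - k : Nat) : Int) + 1).toNat
            = (min ((n + k : Nat) : Int) (2 * (n : Int) - ((n + k : Nat) : Int))).toNat by omega])
  · -- negative even chain: both ranges are empty, both sides are ([1],[1])
    have e1 : PySem.List.pyRange 0 h 1 = [] := by
      rw [PySem.List.pyRange_one]
      rw [show (h - 0).toNat = 0 by omega]
      simp
    have e2 : PySem.List.pyRange 0 (2 * h) 1 = [] := by
      rw [PySem.List.pyRange_one]
      rw [show (2 * h - 0).toNat = 0 by omega]
      simp
    simp [e1, e2]
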